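-- pv_equiv track=rewrite | github.com/sofia-adzhiniiazova/Python | homework07.py | make_order
-- ===== SOURCE A (Python) =====
-- def make_order(num: int):
--     ind = 1
--     cell_string = ""
--     if num != "\nНевозможно выполнить вычитание: уменьшаемое число меньше вычитаемого":
--         if num != "\nНевозможно выполнить деление клеток, делитель равен 0":
--             if num != 0:
--                 while ind <= num:
--                     if ind % 5 != 0:
--                         cell_string = cell_string + "*"
--                     else:
--                         cell_string = cell_string + "*\n"
--                     ind += 1
--     return cell_string
-- ===== SOURCE B (Python) =====
-- def make_order(num: int):
--     if num > 0:
--         return "*****\n" * (num // 5) + "*" * (num % 5)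
--     return ""
-- ===== Notes on version B (the rewrite author's own statement) =====
-- stated objective: faster
-- what changed: Replaces the per-index while loop with a mod test (and the dead string-comparison sentinel guards) by a closed-form block construction: the complete star groups are produced by one string multiplication and the leftover stars by another.
import Mathlib
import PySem

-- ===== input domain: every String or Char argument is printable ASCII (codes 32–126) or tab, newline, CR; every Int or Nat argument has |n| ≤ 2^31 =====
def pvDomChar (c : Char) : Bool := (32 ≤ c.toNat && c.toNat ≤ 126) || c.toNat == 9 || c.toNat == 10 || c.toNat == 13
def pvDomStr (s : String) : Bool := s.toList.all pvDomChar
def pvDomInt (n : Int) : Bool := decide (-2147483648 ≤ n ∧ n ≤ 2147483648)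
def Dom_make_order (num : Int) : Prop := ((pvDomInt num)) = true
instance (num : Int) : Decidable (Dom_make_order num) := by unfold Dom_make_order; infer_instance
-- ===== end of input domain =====

-- B replaces A's per-index while loop (with its dead string-comparison sentinel guards)
-- by a closed-form block construction: num//5 complete "*****\n" groups plus num%5 leftover stars (objective: simpler).


-- ===== PORT A =====
-- the while loop: ind counts up while ind ≤ num, appending "*" or "*\n" at each multiple of 5
def make_order_loop (num ind : Int) (cell_string : String) : String :=
  if ind ≤ num then
    make_order_loop num (ind + 1)
      (if PySem.Int.mod ind 5 ≠ 0 then cell_string ++ "*" else cell_string ++ "*\n")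
  else cell_string
termination_by (num + 1 - ind).toNat
decreasing_by omega

-- A's two outer guards compare the int num with string sentinels; `num != <str>` is always True
-- in Python for an int argument, so they are ported as the always-taken branch.
def make_order (num : Int) : String :=
  if num ≠ 0 then make_order_loop num 1 "" else ""

-- ===== PORT B =====
def make_order_alt (num : Int) : String :=
  if num > 0 then
    String.join (List.replicate (PySem.Int.floordiv num 5).toNat "*****\n")
      ++ String.ofList (List.replicate (PySem.Int.mod num 5).toNat '*')
  else ""

-- ===== PRECONDITION & SPEC =====
def Spec_make_order (num : Int) (out : String) : Prop := out = make_order_alt num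
instance (num : Int) (out : String) : Decidable (Spec_make_order num out) := by unfold Spec_make_order; infer_instance

-- ===== CLAIM (what is proved, stated in full; the proofs are below) =====
def Claim_equal_make_order : Prop := ∀ (num : Int), Dom_make_order num → Spec_make_order num (make_order num)

-- ===== LEMMAS AND PROOFS =====

-- A's loop as a fold over the index range
theorem make_order_loop_eq_foldl (num ind : Int) (cell : String) :
    make_order_loop num ind cell =
      (PySem.List.pyRange ind (num + 1) 1).foldl
        (fun s i => if PySem.Int.mod i 5 ≠ 0 then s ++ "*" else s ++ "*\n") cell := by
  rw [make_order_loop]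
  split
  · rename_i h
    rw [PySem.List.pyRange_one_cons (by omega), List.foldl_cons,
        make_order_loop_eq_foldl]
  · rename_i h
    rw [PySem.List.pyRange_one_eq_nil (by omega), List.foldl_nil]
termination_by (num + 1 - ind).toNat
decreasing_by omega

-- closed form of B at a Nat argument
def blocks (n : Nat) : String :=
  String.join (List.replicate (n / 5) "*****\n") ++ String.ofList (List.replicate (n % 5) '*')

theorem join_replicate_succ (k : Nat) (s : String) :
    String.join (List.replicate (k + 1) s) = String.join (List.replicate k s) ++ s := by
  rw [List.replicate_succ', String.join]
  simp [String.join]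

-- the fold from 1 to n equals the closed form
theorem foldl_blocks (n : Nat) :
    (PySem.List.pyRange 1 ((n : Int) + 1) 1).foldl
        (fun s i => if PySem.Int.mod i 5 ≠ 0 then s ++ "*" else s ++ "*\n") "" = blocks n := by
  induction n with
  | zero =>
      rw [PySem.List.pyRange_one_eq_nil (by omega)]
      simp [blocks, String.join]
  | succ m ih =>
      rw [show ((m + 1 : Nat) : Int) + 1 = ((m : Int) + 1) + 1 by push_cast; ring,
          PySem.List.pyRange_one_succ_right (by omega), List.foldl_append, ih]
      have hmod : PySem.Int.mod ((m : Int) + 1) 5 = (((m + 1) % 5 : Nat) : Int) := by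
        rw [show ((m : Int) + 1) = ((m + 1 : Nat) : Int) by push_cast; ring]
        exact_mod_cast PySem.Int.mod_natCast (m + 1) 5
      apply String.toList_inj.mp
      simp only [List.foldl_cons, List.foldl_nil, hmod, blocks]
      by_cases hc : m % 5 = 4
      · have e1 : (m + 1) % 5 = 0 := by omega
        have e2 : (m + 1) / 5 = m / 5 + 1 := by omega
        simp [e1, e2, hc, join_replicate_succ]
      · have e1 : (m + 1) % 5 = m % 5 + 1 := by omega
        have e2 : (m + 1) / 5 = m / 5 := by omega
        have e4 : ¬((m : Int) % 5 + 1 = 0) := by omega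
        simp [e1, e2, e4, List.replicate_succ']

-- ===== VERDICT (by name: the statement is the Claim_ definition above) =====
theorem make_order_spec : Claim_equal_make_order := by
  intro num _
  unfold Spec_make_order make_order make_order_alt
  by_cases hpos : 0 < num
  · have hne : num ≠ 0 := by omega
    set n : Nat := num.toNat with hn
    have hnum : num = (n : Int) := by omega
    simp only [hne, hpos, ne_eq, not_false_eq_true, if_pos]
    rw [make_order_loop_eq_foldl, hnum, foldl_blocks]
    unfold blocks
    have h5 : (PySem.Int.floordiv (n : Int) 5).toNat = n / 5 := by
      rw [PySem.Int.floordiv_eq_ediv_of_pos (by omega)]; omega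
    have h6 : (PySem.Int.mod (n : Int) 5).toNat = n % 5 := by
      rw [PySem.Int.mod_eq_emod_of_pos (by omega)]; omega
    rw [h5, h6]
  · by_cases h0 : num = 0
    · simp [h0]
    · have : ¬ num > 0 := hpos
      simp only [h0, if_true, this, if_neg, ne_eq, not_false_eq_true]
      rw [make_order_loop_eq_foldl, PySem.List.pyRange_one_eq_nil (by omega)]
      simp
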